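-- pv_equiv track=rewrite | github.com/IncredibleGeek1/Vosk-Speech-to-Text | vosk-model-small-en-us-0.15/vosk_combined_transcribe.py | add_basic_punctuation
-- ===== SOURCE A (Python) =====
-- def add_basic_punctuation(text):
--     """Add enhanced punctuation and capitalization to the transcribed text."""
--     if not text:
--         return text
--
--     # Split the text into words
--     words = text.split()
--     if not words:
--         return text
--
--     # Capitalize the first letter
--     words[0] = words[0][0].upper() + words[0][1:] if len(words[0]) > 1 else words[0].upper()
--
--     # Add punctuation based on rules
--     final_text = ""
--     for i, word in enumerate(words):
--         final_text += word
--         if i < len(words) - 1 and word.lower() in ["and", "but", "or"]: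
--             final_text += ","
--         if i == len(words) - 1 and words[0].lower() in ["what", "where", "when", "why", "how", "who"]:
--             final_text += "?"
--         elif i == len(words) - 1 and any(w.lower() in ["wow", "great"] for w in words):
--             final_text += "!"
--         elif i == len(words) - 1 and not final_text.endswith((".", "!", "?")):
--             final_text += "."
--         if i < len(words) - 1:
--             final_text += " "
--
--     return final_text
-- ===== SOURCE B (Python) =====
-- def add_basic_punctuation(text):
--     """Add enhanced punctuation and capitalization to the transcribed text."""
--     if not text:
--         return text
--
--     words = text.split()
--     if not words:
--         return text
--
--     # Capitalize the first letter (same preprocessing as the original)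
--     words[0] = words[0][0].upper() + words[0][1:] if len(words[0]) > 1 else words[0].upper()
--
--     # Decide the terminal punctuation once, up front.
--     if words[0].lower() in {"what", "where", "when", "why", "how", "who"}:
--         suffix = "?"
--     elif any(w.lower() in {"wow", "great"} for w in words):
--         suffix = "!"
--     elif not words[-1].endswith((".", "!", "?")):
--         suffix = "."
--     else:
--         suffix = ""
--
--     # Assemble recursively: each head word carries its comma/space, the last word the suffix.
--     def render(ws):
--         if len(ws) == 1:
--             return ws[0] + suffix
--         head = ws[0]
--         if head.lower() in {"and", "but", "or"}:
--             head += ","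
--         return head + " " + render(ws[1:])
--
--     return render(words)
-- ===== Notes on version B (the rewrite author's own statement) =====
-- stated objective: alternative
-- what changed: Replaced A's forward indexed accumulator loop (per-iteration last/non-last index tests deciding comma, terminal punctuation and spacing inline) by a precomputed terminal suffix plus a recursive back-to-front assembly of the sentence over the word list.
import Mathlib
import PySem

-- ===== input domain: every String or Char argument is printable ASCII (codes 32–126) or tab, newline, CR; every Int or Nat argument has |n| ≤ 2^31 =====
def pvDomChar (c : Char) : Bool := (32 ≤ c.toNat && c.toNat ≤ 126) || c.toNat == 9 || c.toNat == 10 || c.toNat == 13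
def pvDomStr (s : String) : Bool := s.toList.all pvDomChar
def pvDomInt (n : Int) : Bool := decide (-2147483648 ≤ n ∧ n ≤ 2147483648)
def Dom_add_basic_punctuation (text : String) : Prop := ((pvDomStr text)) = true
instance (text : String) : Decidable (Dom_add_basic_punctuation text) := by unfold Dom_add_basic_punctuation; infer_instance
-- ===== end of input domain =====

-- B replaces A's forward indexed accumulator loop by a precomputed terminal suffix
-- plus a recursive back-to-front assembly over the word list (objective: alternative).

-- shared word-list constants of both Pythons
def pvConj : List (List Char) := [['a','n','d'], ['b','u','t'], ['o','r']]
def pvQws : List (List Char) :=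
  [['w','h','a','t'], ['w','h','e','r','e'], ['w','h','e','n'], ['w','h','y'], ['h','o','w'], ['w','h','o']]
def pvExcl : List (List Char) := [['w','o','w'], ['g','r','e','a','t']]
-- s.endswith((".", "!", "?"))
def pvEndsPunct (s : List Char) : Bool :=
  PySem.Chars.endswith s ['.'] || PySem.Chars.endswith s ['!'] || PySem.Chars.endswith s ['?']
-- words[0][0].upper() + words[0][1:] if len(words[0]) > 1 else words[0].upper()
-- (w.take 1 is exact for words[0][0] since split₀ yields nonempty words)
def pvCapWord (w : List Char) : List Char :=
  if w.length > 1 then PySem.Chars.upper (w.take 1) ++ w.drop 1 else PySem.Chars.upper w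

-- ===== PORT A =====
-- the body of A's `for i, word in enumerate(words)` loop, step for step
def pvLoopBody (n : Nat) (w0 : List Char) (ws : List (List Char))
    (acc : List Char) (iw : Int × List Char) : List Char :=
  let acc1 := acc ++ iw.2
  let acc2 := if iw.1 < (n : Int) - 1 ∧ PySem.Chars.lower iw.2 ∈ pvConj then acc1 ++ [','] else acc1
  let acc3 :=
    if iw.1 = (n : Int) - 1 ∧ PySem.Chars.lower w0 ∈ pvQws then acc2 ++ ['?']
    else if iw.1 = (n : Int) - 1 ∧ (ws.any fun w => decide (PySem.Chars.lower w ∈ pvExcl)) = true then acc2 ++ ['!']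
    else if iw.1 = (n : Int) - 1 ∧ ¬ pvEndsPunct acc2 = true then acc2 ++ ['.']
    else acc2
  if iw.1 < (n : Int) - 1 then acc3 ++ [' '] else acc3

def add_basic_punctuation (text : String) : String :=
  if text.toList = [] then text
  else
    match PySem.Chars.split₀ text.toList with
    | [] => text
    | w0 :: rest =>
      let cw := pvCapWord w0
      let ws := cw :: rest
      String.ofList (List.foldl (pvLoopBody ws.length cw ws) [] (PySem.List.enumerate ws 0))

-- ===== PORT B =====
-- head word's comma: head += "," if head.lower() in the conjunction set
def pvTok (w : List Char) : List Char :=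
  if PySem.Chars.lower w ∈ pvConj then w ++ [','] else w

-- render(ws): last word carries the suffix, each head word carries comma?/space
def pvRender (suffix : List Char) : List (List Char) → List Char
  | [] => []
  | [w] => w ++ suffix
  | w :: x :: rest => pvTok w ++ [' '] ++ pvRender suffix (x :: rest)

def add_basic_punctuation_alt (text : String) : String :=
  if text.toList = [] then text
  else
    match PySem.Chars.split₀ text.toList with
    | [] => text
    | w0 :: rest =>
      let cw := pvCapWord w0
      let ws := cw :: rest
      -- the terminal punctuation, decided once up front
      let suffix :=
        if PySem.Chars.lower cw ∈ pvQws then ['?']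
        else if (ws.any fun w => decide (PySem.Chars.lower w ∈ pvExcl)) = true then ['!']
        else if ¬ pvEndsPunct (ws.getLastD []) = true then ['.']
        else []
      String.ofList (pvRender suffix ws)

-- ===== PRECONDITION & SPEC =====
def Spec_add_basic_punctuation (text : String) (out : String) : Prop := out = add_basic_punctuation_alt text
instance (text : String) (out : String) : Decidable (Spec_add_basic_punctuation text out) := by unfold Spec_add_basic_punctuation; infer_instance

-- ===== CLAIM (what is proved, stated in full; the proofs are below) =====
def Claim_equal_add_basic_punctuation : Prop := ∀ (text : String), Dom_add_basic_punctuation text → Spec_add_basic_punctuation text (add_basic_punctuation text)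

-- ===== LEMMAS AND PROOFS =====

-- A's loop over the non-last words only appends word+comma?+space
theorem pv_prefix_fold (n : Nat) (w0 : List Char) (ws : List (List Char)) :
    ∀ (init : List (List Char)) (i : Int) (acc : List Char),
      0 ≤ i → i + init.length ≤ (n : Int) - 1 →
      List.foldl (pvLoopBody n w0 ws) acc (PySem.List.enumerate init i)
        = acc ++ (init.map (fun w => pvTok w ++ [' '])).flatten := by
  intro init
  induction init with
  | nil => intro i acc _ _; simp [PySem.List.enumerate]
  | cons w rest ih =>
    intro i acc h0 hle
    rw [PySem.List.enumerate_cons, List.foldl_cons]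
    have h1 : i < (n : Int) - 1 := by
      have : (0 : Int) ≤ rest.length := Int.natCast_nonneg _
      simp only [List.length_cons] at hle; push_cast at hle; omega
    have h2 : ¬ i = (n : Int) - 1 := by omega
    have hb : pvLoopBody n w0 ws acc (i, w) = acc ++ pvTok w ++ [' '] := by
      simp only [pvLoopBody, pvTok]
      simp [h1, h2]
      split <;> simp
    have hle' : i + 1 + (rest.length : Int) ≤ (n : Int) - 1 := by
      simp only [List.length_cons] at hle; push_cast at hle ⊢; omega
    rw [hb, ih (i + 1) _ (by omega) hle']
    simp

-- pvRender over a decomposed word list: the prefix tokens, the last word, the suffix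
theorem pv_render_append (suffix : List Char) :
    ∀ (init : List (List Char)) (last : List Char),
      pvRender suffix (init ++ [last])
        = (init.map (fun w => pvTok w ++ [' '])).flatten ++ last ++ suffix := by
  intro init
  induction init with
  | nil => intro last; simp [pvRender]
  | cons x xs ih =>
    intro last
    cases xs with
    | nil => simp [pvRender]
    | cons y ys =>
      have : (x :: (y :: ys) ++ [last] : List (List Char)) = x :: ((y :: ys) ++ [last]) := rfl
      rw [this]
      have h2 : ((y :: ys : List (List Char)) ++ [last]) = y :: (ys ++ [last]) := rfl
      rw [h2, pvRender]
      rw [← h2, ih]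
      simp

-- endswith with a single-char pattern only looks at the last character
theorem pv_endswith_single (s : List Char) (c : Char) :
    PySem.Chars.endswith s [c] = (s.getLast? == some c) := by
  rcases List.eq_nil_or_concat s with rfl | ⟨t, a, rfl⟩
  · rw [Bool.eq_iff_iff]
    simp [PySem.Chars.endswith_iff]
  · rw [Bool.eq_iff_iff]
    simp only [PySem.Chars.endswith_iff, List.concat_eq_append, List.getLast?_concat,
      beq_iff_eq, Option.some.injEq]
    constructor
    · rintro ⟨u, hu⟩
      have := congrArg List.getLast? hu
      simpa [List.getLast?_concat] using this.symm
    · intro h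
      exact ⟨t, by rw [h]⟩

-- a prefix of rendered tokens ends with ' ' (or is empty), so it never changes pvEndsPunct
theorem pv_endsPunct_prefix (init : List (List Char)) (last : List Char) :
    pvEndsPunct ((init.map (fun w => pvTok w ++ [' '])).flatten ++ last)
      = pvEndsPunct last := by
  rcases List.eq_nil_or_concat last with rfl | ⟨ys, y, rfl⟩
  · cases init with
    | nil => simp
    | cons x xs =>
      obtain ⟨zs, hz⟩ : ∃ zs, ((x :: xs).map (fun w => pvTok w ++ [' '])).flatten = zs ++ [' '] := by
        induction xs generalizing x with
        | nil => exact ⟨pvTok x, by simp⟩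
        | cons y ys ih =>
          obtain ⟨zs, hz⟩ := ih y
          refine ⟨pvTok x ++ [' '] ++ zs, ?_⟩
          rw [List.map_cons, List.flatten_cons, hz]
          simp
      rw [List.append_nil, hz]
      simp [pvEndsPunct, pv_endswith_single]
  · simp [pvEndsPunct, pv_endswith_single, ← List.append_assoc]

theorem add_basic_punctuation_eq_alt (text : String) :
    add_basic_punctuation text = add_basic_punctuation_alt text := by
  unfold add_basic_punctuation add_basic_punctuation_alt
  split
  · rfl
  · cases hsp : PySem.Chars.split₀ text.toList with
    | nil => rfl
    | cons w0 rest =>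
      simp only []
      obtain ⟨init, last, hdecomp⟩ :
          ∃ i l, (pvCapWord w0 :: rest : List (List Char)) = i ++ [l] :=
        ⟨_, _, (List.dropLast_append_getLast (l := pvCapWord w0 :: rest) (by simp)).symm⟩
      rw [hdecomp]
      have hbound : (0 : Int) + (init.length : Int) ≤ ((init ++ [last]).length : Int) - 1 := by
        simp
      rw [PySem.List.enumerate_append, List.foldl_append,
        pv_prefix_fold _ _ _ init 0 [] le_rfl hbound]
      have hidx : (0 : Int) + (init.length : Int) = ((init ++ [last]).length : Int) - 1 := by
        simp
      simp only [PySem.List.enumerate, List.foldl_cons, List.foldl_nil,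
        hidx, pvLoopBody, List.getLastD_concat, pv_render_append]
      simp only [lt_self_iff_false, false_and, if_false, true_and, List.nil_append]
      rw [pv_endsPunct_prefix]
      split_ifs <;> simp

-- ===== VERDICT (by name: the statement is the Claim_ definition above) =====
theorem add_basic_punctuation_spec : Claim_equal_add_basic_punctuation := by
  intro text _
  unfold Spec_add_basic_punctuation
  exact add_basic_punctuation_eq_alt text
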